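-- pv_equiv track=rewrite | github.com/TiraWeb/log-analytics | src/analysis/detect_anomalies.py | classify_incident_type
-- ===== SOURCE A (Python) =====
-- from typing import List, Dict, Optional
--
-- def classify_incident_type(anomalies: List[Dict]) -> str:
--     """Classify incident based on which metrics are anomalous."""
--     names = {a['metric_name'] for a in anomalies}
--
--     # Log-signal classifications (primary)
--     if 'error_rate' in names and 'http_5xx_rate' in names:
--         return 'error_spike'
--     if 'error_rate' in names:
--         return 'error_spike'
--     if 'http_5xx_rate' in names:
--         return 'error_spike'
--     if 'latency_p95' in names:
--         return 'latency_spike'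
--
--     # Infra-only classifications (fallback for synthetic mode)
--     if 'db_connections' in names:
--         return 'db_saturation'
--     if 'asg_capacity' in names:
--         return 'asg_capacity_limit'
--     if 'cpu_usage' in names or 'memory_usage' in names:
--         return 'resource_exhaustion'
--
--     return 'unknown_anomaly'
-- ===== SOURCE B (Python) =====
-- from typing import List, Dict
--
-- # (priority, label) per metric; lower priority wins. Single pass, no set.
-- PRIORITY = {
--     'error_rate': (0, 'error_spike'),
--     'http_5xx_rate': (0, 'error_spike'),
--     'latency_p95': (1, 'latency_spike'),
--     'db_connections': (2, 'db_saturation'),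
--     'asg_capacity': (3, 'asg_capacity_limit'),
--     'cpu_usage': (4, 'resource_exhaustion'),
--     'memory_usage': (4, 'resource_exhaustion'),
-- }
--
-- def classify_incident_type(anomalies: List[Dict]) -> str:
--     """Classify incident based on which metrics are anomalous."""
--     best = (5, 'unknown_anomaly')
--     for a in anomalies:
--         cand = PRIORITY.get(a['metric_name'], (5, 'unknown_anomaly'))
--         if cand < best:
--             best = cand
--     return best[1]
-- ===== Notes on version B (the rewrite author's own statement) =====
-- stated objective: alternative
-- what changed: Instead of building a set of names and walking a fixed if-chain of membership tests, B maps each anomaly's metric to a numeric priority and keeps a running minimum (priority,label) accumulator in one pass, returning the label of the minimum; no set and no rule chain.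
import Mathlib
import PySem

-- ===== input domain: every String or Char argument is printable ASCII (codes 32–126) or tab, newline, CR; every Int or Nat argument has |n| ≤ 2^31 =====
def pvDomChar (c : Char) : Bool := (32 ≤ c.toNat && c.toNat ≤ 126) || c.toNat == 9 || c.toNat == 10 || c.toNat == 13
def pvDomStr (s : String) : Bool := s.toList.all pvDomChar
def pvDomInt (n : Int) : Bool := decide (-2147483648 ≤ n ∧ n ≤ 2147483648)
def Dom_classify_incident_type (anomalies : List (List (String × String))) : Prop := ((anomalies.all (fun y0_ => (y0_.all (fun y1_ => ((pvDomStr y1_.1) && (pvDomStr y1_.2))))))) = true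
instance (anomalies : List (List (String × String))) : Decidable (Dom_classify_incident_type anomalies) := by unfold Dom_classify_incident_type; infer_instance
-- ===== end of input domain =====

-- ===== PORT A =====
-- B replaces A's set-then-if-chain by a single pass keeping a running minimum
-- (priority, label) pair per metric name (objective: alternative decomposition).
-- a['metric_name'] on an association-list dict: first matching key (exact under Pre_;
-- on a missing key Python raises KeyError, which Pre_ excludes, so the "" default is never hit there)
def pvLookup (a : List (String × String)) : String :=
  ((a.find? (fun p => p.1 == "metric_name")).map Prod.snd).getD ""

def pvNames (anomalies : List (List (String × String))) : PySem.Set String :=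
  anomalies.foldl (fun s a => PySem.Set.add s (pvLookup a)) PySem.Set.empty

def classify_incident_type (anomalies : List (List (String × String))) : String :=
  let names := pvNames anomalies
  if PySem.Set.contains names "error_rate" && PySem.Set.contains names "http_5xx_rate" then "error_spike"
  else if PySem.Set.contains names "error_rate" then "error_spike"
  else if PySem.Set.contains names "http_5xx_rate" then "error_spike"
  else if PySem.Set.contains names "latency_p95" then "latency_spike"
  else if PySem.Set.contains names "db_connections" then "db_saturation"
  else if PySem.Set.contains names "asg_capacity" then "asg_capacity_limit"
  else if PySem.Set.contains names "cpu_usage" || PySem.Set.contains names "memory_usage" then "resource_exhaustion"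
  else "unknown_anomaly"

-- ===== PORT B =====
-- PRIORITY.get(name, (5,'unknown_anomaly')) as an if-chain over the literal dict keys
def pvPrioB (s : String) : Int × String :=
  if s == "error_rate" then (0, "error_spike")
  else if s == "http_5xx_rate" then (0, "error_spike")
  else if s == "latency_p95" then (1, "latency_spike")
  else if s == "db_connections" then (2, "db_saturation")
  else if s == "asg_capacity" then (3, "asg_capacity_limit")
  else if s == "cpu_usage" then (4, "resource_exhaustion")
  else if s == "memory_usage" then (4, "resource_exhaustion")
  else (5, "unknown_anomaly")

-- Python tuple '<' on (int, str)
def pvLess (c b : Int × String) : Bool :=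
  decide (c.1 < b.1) || (c.1 == b.1 && decide (c.2 < b.2))

def classify_incident_type_alt (anomalies : List (List (String × String))) : String :=
  (anomalies.foldl
    (fun best a =>
      let cand := pvPrioB (pvLookup a)
      if pvLess cand best then cand else best)
    ((5 : Int), "unknown_anomaly")).2

-- ===== PRECONDITION & SPEC =====
-- Pre_ excludes exactly the inputs where an anomaly dict lacks 'metric_name',
-- on which both A's set comprehension and B's lookup raise KeyError.
def Pre_classify_incident_type (anomalies : List (List (String × String))) : Prop :=
  (anomalies.all (fun a => a.any (fun p => p.1 == "metric_name"))) = true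
instance (anomalies : List (List (String × String))) : Decidable (Pre_classify_incident_type anomalies) := by unfold Pre_classify_incident_type; infer_instance
def pvWitness_classify_incident_type : (List (List (String × String))) := [[("metric_name", "latency_p95")]]

def Spec_classify_incident_type (anomalies : List (List (String × String))) (out : String) : Prop := out = classify_incident_type_alt anomalies
instance (anomalies : List (List (String × String))) (out : String) : Decidable (Spec_classify_incident_type anomalies out) := by unfold Spec_classify_incident_type; infer_instance

-- ===== CLAIM =====
def Claim_equal_classify_incident_type : Prop := ∀ (anomalies : List (List (String × String))), Dom_classify_incident_type anomalies → Pre_classify_incident_type anomalies → Spec_classify_incident_type anomalies (classify_incident_type anomalies)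

-- ===== LEMMAS AND PROOFS =====

-- numeric priority and its label
def pvNum (s : String) : Int :=
  if s == "error_rate" then 0
  else if s == "http_5xx_rate" then 0
  else if s == "latency_p95" then 1
  else if s == "db_connections" then 2
  else if s == "asg_capacity" then 3
  else if s == "cpu_usage" then 4
  else if s == "memory_usage" then 4
  else 5

def pvLab (m : Int) : String :=
  if m = 0 then "error_spike"
  else if m = 1 then "latency_spike"
  else if m = 2 then "db_saturation"
  else if m = 3 then "asg_capacity_limit"
  else if m = 4 then "resource_exhaustion"
  else "unknown_anomaly"

def pvT (e1 e2 e3 e4 e5 e6 e7 : Bool) : Int :=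
  if e1 || e2 then 0 else if e3 then 1 else if e4 then 2
  else if e5 then 3 else if e6 || e7 then 4 else 5

def pvMF (L : List String) (m : Int) : Int :=
  L.foldl (fun b x => min b (pvNum x)) m

lemma pvPrioB_eq (x : String) : pvPrioB x = (pvNum x, pvLab (pvNum x)) := by
  unfold pvPrioB pvNum; split_ifs <;> rfl

lemma pvNum_bounds (x : String) : 0 ≤ pvNum x ∧ pvNum x ≤ 5 := by
  unfold pvNum; split_ifs <;> omega

lemma pvMF_le (L : List String) (m : Int) : pvMF L m ≤ m := by
  induction L generalizing m with
  | nil => simp [pvMF]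
  | cons x L ih =>
    have := ih (min m (pvNum x))
    simp only [pvMF, List.foldl_cons] at *
    omega

lemma pvMF_shift (L : List String) (m : Int) (hm : m ≤ 5) :
    pvMF L m = min m (pvMF L 5) := by
  induction L generalizing m with
  | nil => simp [pvMF]; omega
  | cons x L ih =>
    have hq := pvNum_bounds x
    simp only [pvMF, List.foldl_cons] at *
    rw [ih (min m (pvNum x)) (by omega), ih (min 5 (pvNum x)) (by omega)]
    omega

lemma pvMF_cons (x : String) (L : List String) :
    pvMF (x :: L) 5 = min (pvNum x) (pvMF L 5) := by
  have hq := pvNum_bounds x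
  have h5 := pvMF_le L 5
  rw [show pvMF (x :: L) 5 = pvMF L (min 5 (pvNum x)) from rfl,
      pvMF_shift L (min 5 (pvNum x)) (by omega)]
  omega

lemma pvMF_eq_T (L : List String) :
    pvMF L 5 = pvT (L.contains "error_rate") (L.contains "http_5xx_rate")
      (L.contains "latency_p95") (L.contains "db_connections")
      (L.contains "asg_capacity") (L.contains "cpu_usage") (L.contains "memory_usage") := by
  induction L with
  | nil => decide
  | cons x L ih =>
    rw [pvMF_cons, ih]
    simp only [List.contains_cons]
    have hs : ∀ n : String, (n == x) = (x == n) := fun n => by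
      by_cases h : x = n <;> simp [h, Ne.symm]
    simp only [hs]
    unfold pvNum pvT
    by_cases h1 : x == "error_rate" <;> by_cases h2 : x == "http_5xx_rate" <;>
      by_cases h3 : x == "latency_p95" <;> by_cases h4 : x == "db_connections" <;>
      by_cases h5 : x == "asg_capacity" <;> by_cases h6 : x == "cpu_usage" <;>
      by_cases h7 : x == "memory_usage" <;>
      (simp only [h1, h2, h3, h4, h5, h6, h7]
       clear ih
       generalize L.contains "error_rate" = c1
       generalize L.contains "http_5xx_rate" = c2
       generalize L.contains "latency_p95" = c3
       generalize L.contains "db_connections" = c4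
       generalize L.contains "asg_capacity" = c5
       generalize L.contains "cpu_usage" = c6
       generalize L.contains "memory_usage" = c7
       revert c1 c2 c3 c4 c5 c6 c7
       decide)

-- fold-step on canonical pairs
lemma pvStep_min (m q : Int) :
    (if pvLess (q, pvLab q) (m, pvLab m) then (q, pvLab q) else (m, pvLab m))
      = (min m q, pvLab (min m q)) := by
  rcases lt_trichotomy q m with h | h | h
  · have hmin : min m q = q := by omega
    rw [if_pos, hmin]
    simp [pvLess, h]
  · subst h
    have hmin : min q q = q := by omega
    have h1 : decide (q < q) = false := decide_eq_false (lt_irrefl q)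
    have h3 : decide (pvLab q < pvLab q) = false := decide_eq_false (lt_irrefl _)
    rw [if_neg, hmin]
    simp [pvLess]
  · have hmin : min m q = m := by omega
    have h1 : decide (q < m) = false := decide_eq_false (by omega)
    have h2 : (q == m) = false := by simp only [beq_eq_false_iff_ne]; omega
    rw [if_neg, hmin]
    simp [pvLess, h1, h2]

lemma pvFold_eq (L : List String) (m : Int) :
    L.foldl (fun best x =>
        let cand := pvPrioB x
        if pvLess cand best then cand else best) (m, pvLab m)
      = (pvMF L m, pvLab (pvMF L m)) := by
  induction L generalizing m with
  | nil => simp [pvMF]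
  | cons x L ih =>
    rw [show pvMF (x :: L) m = pvMF L (min m (pvNum x)) from rfl,
        ← ih (min m (pvNum x)), List.foldl_cons]
    congr 1
    simp only [pvPrioB_eq]
    exact pvStep_min m (pvNum x)

lemma pvContains_names (anomalies : List (List (String × String))) (n : String) :
    PySem.Set.contains (pvNames anomalies) n = (anomalies.map pvLookup).contains n := by
  have hmem : n ∈ pvNames anomalies ↔ n ∈ anomalies.map pvLookup := by
    unfold pvNames
    rw [PySem.Set.mem_foldl_add]
    simp [PySem.Set.empty, List.mem_map, eq_comm]
  rw [PySem.Set.contains_eq_listContains]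
  by_cases hn : n ∈ anomalies.map pvLookup
  · simp [hn, hmem.mpr hn]
  · have h2 : n ∉ pvNames anomalies := fun h => hn (hmem.mp h)
    simp [hn, h2]

lemma pvChain_lab (e1 e2 e3 e4 e5 e6 e7 : Bool) :
    (if e1 && e2 then "error_spike"
     else if e1 then "error_spike"
     else if e2 then "error_spike"
     else if e3 then "latency_spike"
     else if e4 then "db_saturation"
     else if e5 then "asg_capacity_limit"
     else if e6 || e7 then "resource_exhaustion"
     else "unknown_anomaly")
      = pvLab (pvT e1 e2 e3 e4 e5 e6 e7) := by
  revert e1 e2 e3 e4 e5 e6 e7; decide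

-- ===== VERDICT =====
theorem classify_incident_type_spec : Claim_equal_classify_incident_type := by
  intro anomalies _ _
  simp only [Spec_classify_incident_type, classify_incident_type, classify_incident_type_alt]
  have hb : (anomalies.foldl (fun best a =>
        let cand := pvPrioB (pvLookup a)
        if pvLess cand best then cand else best) (((5 : Int)), "unknown_anomaly"))
      = ((anomalies.map pvLookup).foldl (fun best x =>
        let cand := pvPrioB x
        if pvLess cand best then cand else best) (((5 : Int)), "unknown_anomaly")) := by
    rw [List.foldl_map]
  rw [hb, show (((5 : Int)), "unknown_anomaly") = (((5 : Int)), pvLab 5) from rfl, pvFold_eq]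
  simp only [pvContains_names]
  rw [pvChain_lab, pvMF_eq_T]
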